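-- pv_equiv track=rewrite | github.com/Azothyr/MayaPythonToolbox | ScriptsInMaya/utilities/cmds_class_builder.py | class_arg_map_creator
-- ===== SOURCE A (Python) =====
-- def class_arg_map_creator(data):
--     long_names, short_names, types, properties, descriptions = data
--     arg_map = {}
--     class_map = []
--
--     for i in range(len(long_names)):
--         temp = []
--         long_name = long_names[i]
--         short_name = short_names[i]
--         ret_type = types[i]
--         use_case = properties[i]
--         description = descriptions[i]
--         description = description.replace('"', '\\"')
--         count = 0
--         for ch in description:
--             if count > 85:
--                 if ch == " ":
--                     temp.append("\"\n\t\t\"")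
--                     count = 0
--             temp.append(ch)
--             count += 1
--         description = "".join(temp)
--
--         arg_map[short_name] = {
--             "name": long_name,
--             "description": description,
--             "type": ret_type,
--             "property": use_case
--         }
--
--     return arg_map, class_map
-- ===== SOURCE B (Python) =====
-- def class_arg_map_creator(data):
--     long_names, short_names, types, properties, descriptions = data
--     arg_map = {}
--
--     for long_name, short_name, ret_type, use_case, description in zip(
--             long_names, short_names, types, properties, descriptions):
--         # wrap word-by-word: split on single spaces, re-join with a break
--         # token inserted before any space reached with more than 85 chars
--         # accumulated since the last break
--         words = description.replace('"', '\\"').split(' ')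
--         parts = [words[0]]
--         count = len(words[0])
--         for w in words[1:]:
--             if count > 85:
--                 parts.append("\"\n\t\t\"")
--                 count = 0
--             parts.append(' ')
--             parts.append(w)
--             count += 1 + len(w)
--
--         arg_map[short_name] = {
--             "name": long_name,
--             "description": "".join(parts),
--             "type": ret_type,
--             "property": use_case
--         }
--
--     return arg_map, []
-- ===== Notes on version B (the rewrite author's own statement) =====
-- stated objective: alternative
-- what changed: The per-character wrap loop (checking the count at every character) is replaced by a split-on-spaces / re-join word loop that only tests the count once per space, and the index-based outer loop over range(len(long_names)) is replaced by a zip over the five lists.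
import Mathlib
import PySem

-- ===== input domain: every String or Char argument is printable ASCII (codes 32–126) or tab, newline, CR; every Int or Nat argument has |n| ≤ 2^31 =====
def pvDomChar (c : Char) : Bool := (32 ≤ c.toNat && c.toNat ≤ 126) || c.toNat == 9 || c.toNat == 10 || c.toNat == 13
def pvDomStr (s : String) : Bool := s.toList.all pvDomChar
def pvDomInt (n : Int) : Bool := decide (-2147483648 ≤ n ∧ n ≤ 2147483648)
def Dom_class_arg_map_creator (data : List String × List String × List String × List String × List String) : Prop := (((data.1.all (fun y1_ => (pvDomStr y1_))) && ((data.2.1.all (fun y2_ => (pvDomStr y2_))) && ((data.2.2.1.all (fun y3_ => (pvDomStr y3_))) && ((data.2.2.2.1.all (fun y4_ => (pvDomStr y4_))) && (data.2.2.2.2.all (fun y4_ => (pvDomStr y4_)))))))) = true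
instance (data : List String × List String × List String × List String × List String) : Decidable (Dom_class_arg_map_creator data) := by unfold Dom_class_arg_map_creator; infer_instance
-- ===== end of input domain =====

-- B re-implements the inner character-by-character wrap as a split-on-spaces /
-- re-join word loop and replaces A's index loop by a zip; equal return value on Pre_.

-- ===== PORT A =====
-- A-side helper: the inner wrap of one description, transliterating A's lines
-- (escape the quotes, then the character loop with the running count, then join)
def pvWrapA (description : String) : String :=
  let description := PySem.Str.replace description "\"" "\\\""
  let tc := description.toList.foldl
    (fun (tc : List String × Int) ch =>
      let tc := if tc.2 > 85 then
                  (if ch = ' ' then (tc.1 ++ ["\"\n\t\t\""], (0 : Int)) else tc)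
                else tc
      (tc.1 ++ [String.singleton ch], tc.2 + 1))
    ([], (0 : Int))
  PySem.Str.join "" tc.1

def class_arg_map_creator (data : List String × List String × List String × List String × List String) : (List (String × List (String × String))) × List String :=
  let long_names := data.1
  let short_names := data.2.1
  let types := data.2.2.1
  let properties := data.2.2.2.1
  let descriptions := data.2.2.2.2
  let class_map : List String := []
  let arg_map := (PySem.List.pyRange 0 (long_names.length : Int) 1).foldl
    (fun (arg_map : PySem.Dict String (List (String × String))) i =>
      let long_name := PySem.List.pyGetD long_names i ""
      let short_name := PySem.List.pyGetD short_names i ""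
      let ret_type := PySem.List.pyGetD types i ""
      let use_case := PySem.List.pyGetD properties i ""
      let description := PySem.List.pyGetD descriptions i ""
      arg_map.insert short_name
        [("name", long_name), ("description", pvWrapA description),
         ("type", ret_type), ("property", use_case)])
    PySem.Dict.empty
  (arg_map.items, class_map)

-- ===== PORT B =====
-- B-side helper: wrap by splitting on single spaces and re-joining, inserting
-- the break token before any space reached with count > 85
def pvWrapB (description : String) : String :=
  let words := (PySem.Str.split? (PySem.Str.replace description "\"" "\\\"") " ").getD []
  match words with
  | [] => ""   -- unreachable: str.split(' ') is never empty
  | w0 :: rest =>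
    let pc := rest.foldl
      (fun (pc : List String × Int) w =>
        let pc := if pc.2 > 85 then (pc.1 ++ ["\"\n\t\t\""], (0 : Int)) else pc
        (pc.1 ++ [" ", w], pc.2 + 1 + PySem.Str.len w))
      ([w0], PySem.Str.len w0)
    PySem.Str.join "" pc.1

def class_arg_map_creator_alt (data : List String × List String × List String × List String × List String) : (List (String × List (String × String))) × List String :=
  let zipped := data.1.zip (data.2.1.zip (data.2.2.1.zip (data.2.2.2.1.zip data.2.2.2.2)))
  let arg_map := zipped.foldl
    (fun (arg_map : PySem.Dict String (List (String × String))) x =>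
      arg_map.insert x.2.1
        [("name", x.1), ("description", pvWrapB x.2.2.2.2),
         ("type", x.2.2.1), ("property", x.2.2.2.1)])
    PySem.Dict.empty
  (arg_map.items, [])

-- ===== PRECONDITION & SPEC =====
-- A indexes the other four lists at every i < len(long_names): Pre_ excludes
-- exactly the inputs where some other list is shorter (A raises IndexError there).
def Pre_class_arg_map_creator (data : List String × List String × List String × List String × List String) : Prop :=
  data.1.length ≤ data.2.1.length ∧ data.1.length ≤ data.2.2.1.length ∧
  data.1.length ≤ data.2.2.2.1.length ∧ data.1.length ≤ data.2.2.2.2.length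
instance (data : List String × List String × List String × List String × List String) : Decidable (Pre_class_arg_map_creator data) := by unfold Pre_class_arg_map_creator; infer_instance
def pvWitness_class_arg_map_creator : (List String × List String × List String × List String × List String) :=
  (["longName"], ["ln"], ["bool"], ["create"], ["a short description"])

def Spec_class_arg_map_creator (data : List String × List String × List String × List String × List String) (out : (List (String × List (String × String))) × List String) : Prop := out = class_arg_map_creator_alt data
instance (data : List String × List String × List String × List String × List String) (out : (List (String × List (String × String))) × List String) : Decidable (Spec_class_arg_map_creator data out) := by unfold Spec_class_arg_map_creator; infer_instance

-- ===== CLAIM (what is proved, stated in full; the proofs are below) =====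
def Claim_equal_class_arg_map_creator : Prop := ∀ (data : List String × List String × List String × List String × List String), Dom_class_arg_map_creator data → Pre_class_arg_map_creator data → Spec_class_arg_map_creator data (class_arg_map_creator data)
-- ===== LEMMAS AND PROOFS =====
def pvSplitW : List Char → List (List Char)
  | [] => [[]]
  | c :: r =>
    if c = ' ' then [] :: pvSplitW r
    else match pvSplitW r with
         | w :: ws => (c :: w) :: ws
         | [] => [[c]]

theorem pvSplitW_ne_nil (l : List Char) : pvSplitW l ≠ [] := by
  induction l with
  | nil => simp [pvSplitW]
  | cons c r ih =>
    by_cases hc : c = ' '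
    · simp [pvSplitW, hc]
    · rcases h : pvSplitW r with _ | ⟨w, ws⟩ <;> simp [pvSplitW, hc, h]

theorem pvSplitW_no_space (l : List Char) : ∀ w ∈ pvSplitW l, ' ' ∉ w := by
  induction l with
  | nil => simp [pvSplitW]
  | cons c r ih =>
    by_cases hc : c = ' '
    · simp only [pvSplitW, if_pos hc, List.mem_cons]
      rintro w (rfl | hw)
      · simp
      · exact ih w hw
    · rcases h : pvSplitW r with _ | ⟨w0, ws⟩
      · exact absurd h (pvSplitW_ne_nil r)
      · simp only [pvSplitW, if_neg hc, h, List.mem_cons]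
        rintro w (rfl | hw)
        · simp only [List.mem_cons, not_or]
          exact ⟨fun hsp => hc hsp.symm, ih w0 (h ▸ List.mem_cons_self) ⟩
        · exact ih w (h ▸ List.mem_cons_of_mem _ hw)

theorem pvSplitW_flatten (l : List Char) :
    ∀ w ws, pvSplitW l = w :: ws → w ++ ws.flatMap (fun u => ' ' :: u) = l := by
  induction l with
  | nil => intro w ws h; simp [pvSplitW] at h; simp [h.1, h.2]
  | cons c r ih =>
    intro w ws h
    by_cases hc : c = ' '
    · rcases hr : pvSplitW r with _ | ⟨w0, ws0⟩
      · exact absurd hr (pvSplitW_ne_nil r)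
      · simp only [pvSplitW, if_pos hc, hr] at h
        cases h
        have := ih w0 ws0 hr
        simp [List.flatMap_cons, hc, this]
    · rcases hr : pvSplitW r with _ | ⟨w0, ws0⟩
      · exact absurd hr (pvSplitW_ne_nil r)
      · simp only [pvSplitW, if_neg hc, hr] at h
        cases h
        have := ih w0 ws hr
        simp [this]

def pvMapHead (f : List Char → List Char) : List (List Char) → List (List Char)
  | [] => []
  | w :: ws => f w :: ws

theorem pvGo' (fuel : Nat) : ∀ (l cur : List Char) (acc : List (List Char)),
    l.length < fuel →
    PySem.Chars.splitOn.go [' '] fuel l cur acc = acc.reverse ++ pvMapHead (fun w => cur.reverse ++ w) (pvSplitW l) := by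
  induction fuel with
  | zero => intro l cur acc h; omega
  | succ fuel ih =>
    intro l cur acc h
    cases l with
    | nil =>
      simp [PySem.Chars.splitOn.go, pvSplitW, pvMapHead]
    | cons c rest =>
      by_cases hc : c = ' '
      · subst hc
        rw [show PySem.Chars.splitOn.go [' '] (fuel+1) (' '::rest) cur acc
              = PySem.Chars.splitOn.go [' '] fuel rest [] (cur.reverse :: acc) by
            simp [PySem.Chars.splitOn.go, List.isPrefixOf]]
        rw [ih rest [] (cur.reverse :: acc) (by simpa using Nat.lt_of_succ_lt_succ h)]
        rcases hr : pvSplitW rest with _ | ⟨w0, ws0⟩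
        · exact absurd hr (pvSplitW_ne_nil rest)
        · simp [pvSplitW, pvMapHead, hr]
      · rw [show PySem.Chars.splitOn.go [' '] (fuel+1) (c::rest) cur acc
              = PySem.Chars.splitOn.go [' '] fuel rest (c :: cur) acc by
            simp [PySem.Chars.splitOn.go, List.isPrefixOf, Ne.symm hc]]
        rw [ih rest (c :: cur) acc (by simpa using Nat.lt_of_succ_lt_succ h)]
        rcases hr : pvSplitW rest with _ | ⟨w0, ws0⟩
        · exact absurd hr (pvSplitW_ne_nil rest)
        · simp [pvSplitW, pvMapHead, hr, hc]

theorem pvSplitOn_eq_splitW (l : List Char) : PySem.Chars.splitOn l [' '] = pvSplitW l := by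
  unfold PySem.Chars.splitOn
  rw [pvGo' (l.length + 1) l [] [] (by omega)]
  rcases hr : pvSplitW l with _ | ⟨w0, ws0⟩
  · exact absurd hr (pvSplitW_ne_nil l)
  · simp [pvMapHead]
def pvBrk : List Char := ['"', '\n', '\t', '\t', '"']

def pvWrapC (acc : List Char) (c : Int) : List Char → List Char × Int
  | [] => (acc, c)
  | ch :: rest =>
    if c > 85 ∧ ch = ' ' then pvWrapC (acc ++ pvBrk ++ [ch]) 1 rest
    else pvWrapC (acc ++ [ch]) (c + 1) rest

def pvFlat (l : List String) : List Char := (l.map String.toList).flatten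

theorem pvWrapC_append (xs : List Char) : ∀ (acc : List Char) (c : Int) (ys : List Char),
    pvWrapC acc c (xs ++ ys) = pvWrapC (pvWrapC acc c xs).1 (pvWrapC acc c xs).2 ys := by
  induction xs with
  | nil => intro acc c ys; simp [pvWrapC]
  | cons ch rest ih =>
    intro acc c ys
    by_cases h : c > 85 ∧ ch = ' ' <;> simp [pvWrapC, h, ih]

theorem pvWrapC_no_space (u : List Char) : ∀ (acc : List Char) (c : Int), ' ' ∉ u →
    pvWrapC acc c u = (acc ++ u, c + u.length) := by
  induction u with
  | nil => intro acc c _; simp [pvWrapC]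
  | cons ch rest ih =>
    intro acc c h
    simp only [List.mem_cons, not_or] at h
    have : ¬ (c > 85 ∧ ch = ' ') := fun hh => h.1 (hh.2 ▸ rfl)
    rw [pvWrapC, if_neg this, ih _ _ h.2]
    simp only [Prod.mk.injEq]
    refine ⟨by simp, by simp [List.length_cons]; ring⟩

theorem pvWrapA_foldl (cs : List Char) : ∀ (temp : List String) (c : Int),
    (pvFlat (cs.foldl (fun (tc : List String × Int) ch =>
        let tc := if tc.2 > 85 then
                    (if ch = ' ' then (tc.1 ++ ["\"\n\t\t\""], (0 : Int)) else tc)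
                  else tc
        (tc.1 ++ [String.singleton ch], tc.2 + 1)) (temp, c)).1,
     (cs.foldl (fun (tc : List String × Int) ch =>
        let tc := if tc.2 > 85 then
                    (if ch = ' ' then (tc.1 ++ ["\"\n\t\t\""], (0 : Int)) else tc)
                  else tc
        (tc.1 ++ [String.singleton ch], tc.2 + 1)) (temp, c)).2)
    = pvWrapC (pvFlat temp) c cs := by
  induction cs with
  | nil => intro temp c; simp [pvWrapC]
  | cons ch rest ih =>
    intro temp c
    by_cases h1 : c > 85
    · by_cases h2 : ch = ' '
      · rw [List.foldl_cons]
        simp only [h1, h2, if_pos]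
        rw [ih]
        rw [pvWrapC, if_pos ⟨h1, rfl⟩]
        congr 1
        simp [pvFlat, pvBrk]
      · rw [List.foldl_cons]
        simp only [h1, if_pos, h2, if_false]
        rw [ih]
        rw [pvWrapC, if_neg (fun hh => h2 hh.2)]
        congr 1
        simp [pvFlat]
    · rw [List.foldl_cons]
      simp only [h1, if_false]
      rw [ih]
      rw [pvWrapC, if_neg (fun hh => h1 hh.1)]
      congr 1
      simp [pvFlat]

theorem pvBrkStr_toList : ("\"\n\t\t\"" : String).toList = pvBrk := by decide
theorem pvSpaceStr_toList : (" " : String).toList = [' '] := by decide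

theorem pvWrapB_foldl (ws : List (List Char)) : ∀ (parts : List String) (c : Int),
    (∀ w ∈ ws, ' ' ∉ w) →
    (pvFlat ((ws.map String.ofList).foldl (fun (pc : List String × Int) w =>
        let pc := if pc.2 > 85 then (pc.1 ++ ["\"\n\t\t\""], (0 : Int)) else pc
        (pc.1 ++ [" ", w], pc.2 + 1 + PySem.Str.len w)) (parts, c)).1,
     ((ws.map String.ofList).foldl (fun (pc : List String × Int) w =>
        let pc := if pc.2 > 85 then (pc.1 ++ ["\"\n\t\t\""], (0 : Int)) else pc
        (pc.1 ++ [" ", w], pc.2 + 1 + PySem.Str.len w)) (parts, c)).2)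
    = pvWrapC (pvFlat parts) c (ws.flatMap (fun u => ' ' :: u)) := by
  induction ws with
  | nil => intro parts c _; simp [pvWrapC]
  | cons w rest ih =>
    intro parts c hsp
    rw [List.map_cons, List.foldl_cons, List.flatMap_cons]
    rw [show (' ' :: w) ++ rest.flatMap (fun u => ' ' :: u)
          = [' '] ++ (w ++ rest.flatMap (fun u => ' ' :: u)) by simp]
    rw [pvWrapC_append [' ']]
    by_cases h1 : c > 85
    · simp only [h1, if_pos]
      rw [ih _ _ (fun u hu => hsp u (List.mem_cons_of_mem _ hu))]
      rw [show pvWrapC (pvFlat parts) c [' '] = (pvFlat parts ++ pvBrk ++ [' '], 1) by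
            simp [pvWrapC, h1]]
      rw [pvWrapC_append w, pvWrapC_no_space w _ _ (hsp w List.mem_cons_self)]
      have e1 : pvFlat (parts ++ ["\"\n\t\t\""] ++ [" ", String.ofList w])
          = pvFlat parts ++ pvBrk ++ [' '] ++ w := by
        simp [pvFlat, pvBrkStr_toList, pvSpaceStr_toList]
      have e2 : (0 : Int) + 1 + PySem.Str.len (String.ofList w) = 1 + (w.length : Int) := by
        simp [PySem.Str.len]
      rw [e1, e2]
    · simp only [h1, if_false]
      rw [ih _ _ (fun u hu => hsp u (List.mem_cons_of_mem _ hu))]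
      rw [show pvWrapC (pvFlat parts) c [' '] = (pvFlat parts ++ [' '], c + 1) by
            simp [pvWrapC, h1]]
      rw [pvWrapC_append w, pvWrapC_no_space w _ _ (hsp w List.mem_cons_self)]
      have e1 : pvFlat (parts ++ [" ", String.ofList w])
          = pvFlat parts ++ [' '] ++ w := by
        simp [pvFlat, pvSpaceStr_toList]
      have e2 : c + 1 + PySem.Str.len (String.ofList w) = c + 1 + (w.length : Int) := by
        simp [PySem.Str.len]
      rw [e1, e2]

theorem pvIntercalate_nil (l : List (List Char)) : ([] : List Char).intercalate l = l.flatten := by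
  induction l with
  | nil => rfl
  | cons x xs ih => cases xs <;> simp_all [List.intercalate]

theorem pvJoin_empty (l : List String) : PySem.Str.join "" l = String.ofList (pvFlat l) := by
  simp [PySem.Str.join, PySem.Chars.join, pvIntercalate_nil, pvFlat]

set_option maxHeartbeats 1000000 in
theorem pvWrap_eq (description : String) : pvWrapA description = pvWrapB description := by
  unfold pvWrapA pvWrapB
  have hsplit : (PySem.Str.split? (PySem.Str.replace description "\"" "\\\"") " ").getD []
      = (pvSplitW (PySem.Str.replace description "\"" "\\\"").toList).map String.ofList := by
    simp [PySem.Str.split?, PySem.Chars.split?, pvSpaceStr_toList, pvSplitOn_eq_splitW]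
  rcases hr : pvSplitW (PySem.Str.replace description "\"" "\\\"").toList with _ | ⟨w0, ws0⟩
  · exact absurd hr (pvSplitW_ne_nil _)
  rw [hsplit, hr, List.map_cons]
  simp only []
  rw [pvJoin_empty, pvJoin_empty]
  congr 1
  have hA := congrArg Prod.fst (pvWrapA_foldl (PySem.Str.replace description "\"" "\\\"").toList [] 0)
  have hB := congrArg Prod.fst (pvWrapB_foldl ws0 [String.ofList w0] (PySem.Str.len (String.ofList w0))
      (fun u hu => pvSplitW_no_space _ u (hr ▸ List.mem_cons_of_mem _ hu)))
  rw [show pvFlat ([] : List String) = [] from rfl] at hA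
  simp only [] at hA hB
  rw [hA, hB]
  have hd : (PySem.Str.replace description "\"" "\\\"").toList
      = w0 ++ ws0.flatMap (fun u => ' ' :: u) := (pvSplitW_flatten _ w0 ws0 hr).symm
  rw [hd, pvWrapC_append w0, pvWrapC_no_space w0 _ _ (pvSplitW_no_space _ w0 (hr ▸ List.mem_cons_self))]
  have : pvFlat [String.ofList w0] = w0 := by simp [pvFlat]
  rw [this]
  have : PySem.Str.len (String.ofList w0) = ((0 : Int) + w0.length) := by simp [PySem.Str.len]
  rw [this]
  simp

theorem pvFold_range_aux {β : Type} (F : β → String → String → String → String → String → β) :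
    ∀ (ls ss ts ps ds : List String) (init : β),
    ls.length ≤ ss.length → ls.length ≤ ts.length → ls.length ≤ ps.length → ls.length ≤ ds.length →
    (List.range ls.length).foldl
      (fun d k => F d (ls.getD k "") (ss.getD k "") (ts.getD k "") (ps.getD k "") (ds.getD k "")) init
    = (ls.zip (ss.zip (ts.zip (ps.zip ds)))).foldl
        (fun d x => F d x.1 x.2.1 x.2.2.1 x.2.2.2.1 x.2.2.2.2) init := by
  intro ls
  induction ls with
  | nil => intro ss ts ps ds init _ _ _ _; simp
  | cons l ls' ih =>
    intro ss ts ps ds init h1 h2 h3 h4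
    cases ss with | nil => simp at h1 | cons s ss' =>
    cases ts with | nil => simp at h2 | cons t ts' =>
    cases ps with | nil => simp at h3 | cons p ps' =>
    cases ds with | nil => simp at h4 | cons dd ds' =>
    rw [List.length_cons, List.range_succ_eq_map, List.foldl_cons, List.foldl_map]
    simp only [List.getD_cons_zero, List.getD_cons_succ]
    rw [ih ss' ts' ps' ds' _ (by simpa using h1) (by simpa using h2) (by simpa using h3) (by simpa using h4)]
    simp [List.zip_cons_cons]

theorem pvFold_range_zip {β : Type} (F : β → String → String → String → String → String → β)
    (ls ss ts ps ds : List String) (init : β)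
    (h1 : ls.length ≤ ss.length) (h2 : ls.length ≤ ts.length)
    (h3 : ls.length ≤ ps.length) (h4 : ls.length ≤ ds.length) :
    (PySem.List.pyRange 0 (ls.length : Int) 1).foldl
      (fun d i => F d (PySem.List.pyGetD ls i "") (PySem.List.pyGetD ss i "")
                      (PySem.List.pyGetD ts i "") (PySem.List.pyGetD ps i "")
                      (PySem.List.pyGetD ds i "")) init
    = (ls.zip (ss.zip (ts.zip (ps.zip ds)))).foldl
        (fun d x => F d x.1 x.2.1 x.2.2.1 x.2.2.2.1 x.2.2.2.2) init := by
  rw [PySem.List.pyRange_one, List.foldl_map]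
  simp only [Int.sub_zero, Int.toNat_natCast, zero_add, PySem.List.pyGetD_natCast]
  exact pvFold_range_aux F ls ss ts ps ds init h1 h2 h3 h4

-- ===== VERDICT (by name: the statement is the Claim_ definition above) =====
theorem class_arg_map_creator_spec : Claim_equal_class_arg_map_creator := by
  intro data _ hpre
  obtain ⟨h1, h2, h3, h4⟩ := hpre
  unfold Spec_class_arg_map_creator class_arg_map_creator class_arg_map_creator_alt
  simp only []
  rw [pvFold_range_zip
        (fun d l s t p dd => d.insert s
          [("name", l), ("description", pvWrapA dd), ("type", t), ("property", p)])
        data.1 data.2.1 data.2.2.1 data.2.2.2.1 data.2.2.2.2 PySem.Dict.empty h1 h2 h3 h4]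
  simp only [pvWrap_eq]
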